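-- pv_equiv track=rewrite | github.com/ecousadba4-pixel/ai-chatbot-u4s | backend/conversation.py | replace_system_prompt
-- ===== SOURCE A (Python) =====
-- from typing import Any, Sequence
--
-- ChatModelMessage = dict[str, str]
--
-- def replace_system_prompt(
--     messages: Sequence[ChatModelMessage], new_prompt: str
-- ) -> list[ChatModelMessage]:
--     replaced: list[ChatModelMessage] = []
--     system_set = False
--     for message in messages:
--         role = message.get("role")
--         if role == "system":
--             if not system_set:
--                 replaced.append({"role": "system", "content": new_prompt})
--                 system_set = True
--             continue
--         replaced.append({"role": str(role), "content": str(message.get("content", "")).strip()})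
--
--     if not system_set:
--         replaced.insert(0, {"role": "system", "content": new_prompt})
--     return replaced
-- ===== SOURCE B (Python) =====
-- def replace_system_prompt(messages, new_prompt):
--     cleaned = [
--         {"role": str(m.get("role")), "content": str(m.get("content", "")).strip()}
--         for m in messages
--         if m.get("role") != "system"
--     ]
--     pos = next((i for i, m in enumerate(messages) if m.get("role") == "system"), 0)
--     cleaned.insert(pos, {"role": "system", "content": new_prompt})
--     return cleaned
-- ===== Notes on version B (the rewrite author's own statement) =====
-- stated objective: alternative
-- what changed: Replaces A's single flagged loop (append-or-skip with a system_set flag and a conditional front-insert) by two shaped passes: a filter+map comprehension producing the transformed non-system messages, a separately computed insertion index (index of the first system message, 0 if none), then one list.insert.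
import Mathlib
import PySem

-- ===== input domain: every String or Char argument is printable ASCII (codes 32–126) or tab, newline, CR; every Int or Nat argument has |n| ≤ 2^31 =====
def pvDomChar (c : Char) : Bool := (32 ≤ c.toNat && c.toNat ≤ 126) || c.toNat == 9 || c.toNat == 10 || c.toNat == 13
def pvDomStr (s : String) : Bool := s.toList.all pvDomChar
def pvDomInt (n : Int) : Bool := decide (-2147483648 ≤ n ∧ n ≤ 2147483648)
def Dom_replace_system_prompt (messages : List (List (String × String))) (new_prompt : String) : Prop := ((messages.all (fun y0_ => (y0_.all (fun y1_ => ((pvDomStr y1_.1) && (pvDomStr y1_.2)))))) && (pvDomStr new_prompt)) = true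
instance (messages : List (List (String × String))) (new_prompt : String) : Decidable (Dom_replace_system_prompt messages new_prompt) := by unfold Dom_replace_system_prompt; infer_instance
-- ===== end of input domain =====

-- B rebuilds the result in two shaped passes (filter+map comprehension, then a separately
-- computed insertion index, then one insert) instead of A's single flagged loop; objective:
-- alternative decomposition, same O(n) cost.

-- ===== PORT A =====
-- m.get(k): first-match lookup in the association list (Python dict.get)
def pvGet? (m : List (String × String)) (k : String) : Option String :=
  (m.find? (fun p => p.1 == k)).map (·.2)

-- str(role) where role = m.get("role") (None prints as "None")
def pvStrOpt : Option String → String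
  | none => "None"
  | some s => s

-- {"role": "system", "content": new_prompt}
def pvSys (p : String) : List (String × String) := [("role", "system"), ("content", p)]

-- {"role": str(role), "content": str(m.get("content","")).strip()}
def pvOth (m : List (String × String)) : List (String × String) :=
  [("role", pvStrOpt (pvGet? m "role")), ("content", PySem.Str.strip ((pvGet? m "content").getD ""))]

-- A's for-loop: state = (replaced so far, system_set); built by structural recursion
def pvLoopA (new_prompt : String) : List (List (String × String)) → Bool → (List (List (String × String)) × Bool)
  | [], flag => ([], flag)
  | m :: rest, flag =>
    if pvGet? m "role" == some "system" then
      if flag then pvLoopA new_prompt rest true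
      else
        let r := pvLoopA new_prompt rest true
        (pvSys new_prompt :: r.1, r.2)
    else
      let r := pvLoopA new_prompt rest flag
      (pvOth m :: r.1, r.2)

def replace_system_prompt (messages : List (List (String × String))) (new_prompt : String) : List (List (String × String)) :=
  let r := pvLoopA new_prompt messages false
  if r.2 then r.1 else pvSys new_prompt :: r.1

-- ===== PORT B =====
def pvIsSys (m : List (String × String)) : Bool := pvGet? m "role" == some "system"

-- next((i for i, m in enumerate(messages) if m.get("role") == "system"), 0) : index of first system message
def pvFirstSysIdx : List (List (String × String)) → Option Nat
  | [] => none
  | m :: rest => if pvIsSys m then some 0 else (pvFirstSysIdx rest).map (· + 1)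

def replace_system_prompt_alt (messages : List (List (String × String))) (new_prompt : String) : List (List (String × String)) :=
  let cleaned := (messages.filter (fun m => !(pvIsSys m))).map pvOth
  let pos : Int := ((pvFirstSysIdx messages).getD 0 : Nat)
  PySem.List.insert cleaned pos (pvSys new_prompt)

-- ===== PRECONDITION & SPEC =====
def Spec_replace_system_prompt (messages : List (List (String × String))) (new_prompt : String) (out : List (List (String × String))) : Prop := out = replace_system_prompt_alt messages new_prompt
instance (messages : List (List (String × String))) (new_prompt : String) (out : List (List (String × String))) : Decidable (Spec_replace_system_prompt messages new_prompt out) := by unfold Spec_replace_system_prompt; infer_instance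

-- ===== CLAIM (what is proved, stated in full; the proofs are below) =====
def Claim_equal_replace_system_prompt : Prop := ∀ (messages : List (List (String × String))) (new_prompt : String), Dom_replace_system_prompt messages new_prompt → Spec_replace_system_prompt messages new_prompt (replace_system_prompt messages new_prompt)

-- ===== LEMMAS AND PROOFS =====

-- once the flag is set, the rest of A's loop just filters out systems and transforms
theorem pvLoopA_true (p : String) (msgs : List (List (String × String))) :
    pvLoopA p msgs true = ((msgs.filter (fun m => !(pvIsSys m))).map pvOth, true) := by
  induction msgs with
  | nil => rfl
  | cons m rest ih =>
    by_cases hs : pvIsSys m = true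
    · have hs' : (pvGet? m "role" == some "system") = true := hs
      simp [pvLoopA, hs', ih, hs]
    · have hs' : ¬ ((pvGet? m "role" == some "system") = true) := hs
      simp only [Bool.not_eq_true] at hs
      simp [pvLoopA, hs', ih, hs]

-- the first-system index never exceeds the number of non-system messages
theorem pvFirstSysIdx_le (msgs : List (List (String × String))) (i : Nat)
    (h : pvFirstSysIdx msgs = some i) :
    i ≤ (msgs.filter (fun m => !(pvIsSys m))).length := by
  induction msgs generalizing i with
  | nil => simp [pvFirstSysIdx] at h
  | cons m rest ih =>
    by_cases hs : pvIsSys m = true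
    · simp [pvFirstSysIdx, hs] at h
      omega
    · simp only [Bool.not_eq_true] at hs
      simp [pvFirstSysIdx, hs] at h
      obtain ⟨j, hj, rfl⟩ := h
      have := ih j hj
      simp [hs]
      omega

-- characterisation of A's loop started with flag = false
theorem pvLoopA_false (p : String) (msgs : List (List (String × String))) :
    pvLoopA p msgs false =
      ((match pvFirstSysIdx msgs with
        | none => (msgs.filter (fun m => !(pvIsSys m))).map pvOth
        | some i => PySem.List.insert ((msgs.filter (fun m => !(pvIsSys m))).map pvOth) (i : Int) (pvSys p)),
       (pvFirstSysIdx msgs).isSome) := by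
  induction msgs with
  | nil => rfl
  | cons m rest ih =>
    by_cases hs : pvIsSys m = true
    · have hs' : (pvGet? m "role" == some "system") = true := hs
      simp [pvLoopA, hs', pvFirstSysIdx, hs, pvLoopA_true, PySem.List.insert_zero]
    · have hs' : ¬ ((pvGet? m "role" == some "system") = true) := hs
      simp only [Bool.not_eq_true] at hs
      have hfil : (m :: rest).filter (fun x => !(pvIsSys x)) = m :: rest.filter (fun x => !(pvIsSys x)) := by
        simp [hs]
      simp only [pvLoopA, if_neg hs', ih, pvFirstSysIdx, hs, Bool.false_eq_true, if_false, hfil]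
      cases hidx : pvFirstSysIdx rest with
      | none => simp
      | some i =>
        have hle : i ≤ ((rest.filter (fun m => !(pvIsSys m))).map pvOth).length := by
          simpa using pvFirstSysIdx_le rest i hidx
        have h1 := PySem.List.insert_natCast ((rest.filter (fun m => !(pvIsSys m))).map pvOth) i (pvSys p) hle
        have h2 := PySem.List.insert_natCast ((m :: rest.filter (fun m => !(pvIsSys m))).map pvOth) (i + 1) (pvSys p)
          (by simp only [List.map_cons, List.length_cons]; omega)
        rw [List.map_cons] at h2
        simp only [List.map_cons, Option.map_some, Option.isSome_some, h1, h2,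
          List.take_succ_cons, List.drop_succ_cons, List.cons_append]

-- ===== VERDICT (by name: the statement is the Claim_ definition above) =====
theorem replace_system_prompt_spec : Claim_equal_replace_system_prompt := by
  intro messages new_prompt _
  unfold Spec_replace_system_prompt replace_system_prompt replace_system_prompt_alt
  rw [pvLoopA_false]
  cases hidx : pvFirstSysIdx messages with
  | none => simp [PySem.List.insert_zero]
  | some i => simp
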